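-- pv_equiv track=rewrite | github.com/LuisPalominoTrevilla/CompetitiveProgramming | pointsSegments.py | pointsInSegments
-- ===== SOURCE A (Python) =====
-- def pointsInSegments(coordinates, m):
--     coordinates.sort(key=lambda tup: tup[0])
--     curr_segment = 0
--     not_belonging = ""
--     for curr_num in range(1, m+1):
--         while curr_segment < len(coordinates):
--             if coordinates[curr_segment][0] > curr_num:
--                 not_belonging += str(curr_num) + " "
--                 break
--             if (coordinates[curr_segment][0] <= curr_num and coordinates[curr_segment][1] >= curr_num):
--                 break
--             curr_segment+=1
--         if curr_segment >= len(coordinates):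
--             not_belonging += str(curr_num) + " "
--     if not_belonging == "":
--         return "0\n"
--     else:
--         return str(len(not_belonging.split()))+"\n"+not_belonging
-- ===== SOURCE B (Python) =====
-- def pointsInSegments(coordinates, m):
--     # in-place sort kept so the caller-visible mutation matches A's
--     coordinates.sort(key=lambda tup: tup[0])
--     missing = [x for x in range(1, m + 1)
--                if not any(s <= x <= e for s, e in coordinates)]
--     if not missing:
--         return "0\n"
--     return str(len(missing)) + "\n" + "".join(str(x) + " " for x in missing)
-- ===== Notes on version B (the rewrite author's own statement) =====
-- stated objective: simpler
-- what changed: A's stateful two-pointer sweep over the sorted segments with incremental string accumulation is replaced by a direct per-point coverage test (a filter of 1..m by any-segment-covers) followed by one formatting step.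
import Mathlib
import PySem

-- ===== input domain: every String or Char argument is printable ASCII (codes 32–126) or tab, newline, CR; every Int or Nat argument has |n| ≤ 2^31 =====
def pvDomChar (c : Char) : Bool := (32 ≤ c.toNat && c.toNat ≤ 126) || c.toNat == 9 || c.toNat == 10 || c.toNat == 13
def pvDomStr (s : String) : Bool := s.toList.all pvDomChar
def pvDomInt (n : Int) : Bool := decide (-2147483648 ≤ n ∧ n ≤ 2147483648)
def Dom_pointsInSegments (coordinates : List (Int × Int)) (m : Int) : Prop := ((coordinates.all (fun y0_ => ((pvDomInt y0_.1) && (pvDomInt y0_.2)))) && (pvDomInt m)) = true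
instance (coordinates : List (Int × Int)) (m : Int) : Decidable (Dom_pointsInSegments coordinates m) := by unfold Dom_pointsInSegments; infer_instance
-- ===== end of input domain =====

-- B replaces A's two-pointer sweep by a per-point coverage filter plus one formatting pass
-- (objective: simpler). Both A and B sort `coordinates` in place identically; the equivalence
-- proved is about the return value.

-- ===== PORT A =====
-- the inner `while curr_segment < len(coordinates): …` loop of A
def pvInnerA (cs : List (Int × Int)) (num : Int) (i : Nat) (nb : String) : Nat × String :=
  if h : i < cs.length then
    if (cs[i]).1 > num then (i, nb ++ PySem.Int.toStr num ++ " ")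
    else if (cs[i]).1 ≤ num ∧ (cs[i]).2 ≥ num then (i, nb)
    else pvInnerA cs num (i + 1) nb
  else (i, nb ++ PySem.Int.toStr num ++ " ")
termination_by cs.length - i

def pointsInSegments (coordinates : List (Int × Int)) (m : Int) : String :=
  let cs := PySem.List.sorted coordinates (fun tup => tup.1)
  let st := (PySem.List.pyRange 1 (m + 1) 1).foldl (fun st num => pvInnerA cs num st.1 st.2) (0, "")
  if st.2 == "" then "0\n"
  else PySem.Int.toStr ((PySem.Str.split₀ st.2).length : Int) ++ "\n" ++ st.2

-- ===== PORT B =====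
def pointsInSegments_alt (coordinates : List (Int × Int)) (m : Int) : String :=
  let cs := PySem.List.sorted coordinates (fun tup => tup.1)
  let missing := (PySem.List.pyRange 1 (m + 1) 1).filter
      (fun x => !(cs.any (fun se => decide (se.1 ≤ x) && decide (x ≤ se.2))))
  if missing.isEmpty then "0\n"
  else PySem.Int.toStr (missing.length : Int) ++ "\n" ++
       PySem.Str.join "" (missing.map (fun x => PySem.Int.toStr x ++ " "))

-- ===== PRECONDITION & SPEC =====
def Spec_pointsInSegments (coordinates : List (Int × Int)) (m : Int) (out : String) : Prop := out = pointsInSegments_alt coordinates m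
instance (coordinates : List (Int × Int)) (m : Int) (out : String) : Decidable (Spec_pointsInSegments coordinates m out) := by unfold Spec_pointsInSegments; infer_instance

-- ===== CLAIM (what is proved, stated in full; the proofs are below) =====
def Claim_equal_pointsInSegments : Prop := ∀ (coordinates : List (Int × Int)) (m : Int), Dom_pointsInSegments coordinates m → Spec_pointsInSegments coordinates m (pointsInSegments coordinates m)

-- ===== LEMMAS AND PROOFS =====

-- the coverage test of B
def pvCov (cs : List (Int × Int)) (x : Int) : Bool :=
  cs.any (fun se => decide (se.1 ≤ x) && decide (x ≤ se.2))

def pvTok (x : Int) : String := PySem.Int.toStr x ++ " "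

def pvRender (xs : List Int) : String :=
  PySem.Str.join "" (xs.map (fun x => PySem.Int.toStr x ++ " "))

def pvRenderL (xs : List Int) : List Char :=
  (xs.map (fun x => PySem.Int.toChars x ++ [' '])).flatten

lemma pv_join_nil_left (parts : List (List Char)) :
    PySem.Chars.join [] parts = parts.flatten := by
  induction parts with
  | nil => rfl
  | cons a t ih =>
    cases t with
    | nil => simp [PySem.Chars.join, List.intercalate]
    | cons b t' =>
      simp only [PySem.Chars.join, List.intercalate, List.intersperse] at *
      simp_all

lemma pv_toList_render (xs : List Int) : (pvRender xs).toList = pvRenderL xs := by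
  simp [pvRender, pvRenderL, PySem.Str.toList_join, pv_join_nil_left, List.map_map,
    Function.comp_def, String.toList_append, PySem.Int.toList_toStr]

lemma pv_render_nil : pvRender [] = "" := by
  apply String.toList_inj.mp; simp [pv_toList_render, pvRenderL]

lemma pv_render_append (xs ys : List Int) :
    pvRender (xs ++ ys) = pvRender xs ++ pvRender ys := by
  apply String.toList_inj.mp
  simp [pv_toList_render, String.toList_append, pvRenderL]

lemma pv_render_singleton (x : Int) : pvRender [x] = pvTok x := by
  apply String.toList_inj.mp
  simp [pv_toList_render, pvRenderL, pvTok, String.toList_append, PySem.Int.toList_toStr]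

lemma pv_cov_true (cs : List (Int × Int)) (num : Int) (i : Nat) (hi : i < cs.length)
    (h1 : (cs[i]).1 ≤ num) (h2 : num ≤ (cs[i]).2) : pvCov cs num = true := by
  simp only [pvCov, List.any_eq_true]
  exact ⟨cs[i], List.getElem_mem hi, by simp; omega⟩

lemma pv_cov_false (cs : List (Int × Int)) (num : Int)
    (h : ∀ j (hj : j < cs.length), (cs[j]).2 < num ∨ num < (cs[j]).1) :
    pvCov cs num = false := by
  simp only [pvCov, List.any_eq_false]
  intro se hse
  obtain ⟨j, hj, rfl⟩ := List.mem_iff_getElem.mp hse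
  have := h j hj
  simp only [Bool.and_eq_true, decide_eq_true_eq, not_and]
  omega

lemma pvInnerA_spec (cs : List (Int × Int))
    (hp : List.Pairwise (fun a b : Int × Int => a.1 ≤ b.1) cs) (num : Int) :
    ∀ (fuel i : Nat) (nb : String), cs.length ≤ i + fuel → i ≤ cs.length →
    (∀ j (hj : j < cs.length), j < i → (cs[j]).2 < num) →
    ∃ i', pvInnerA cs num i nb = (i', if pvCov cs num then nb else nb ++ pvTok num) ∧
      i' ≤ cs.length ∧ ∀ j (hj : j < cs.length), j < i' → (cs[j]).2 < num := by
  intro fuel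
  induction fuel with
  | zero =>
    intro i nb hf hi hinv
    have hie : ¬ i < cs.length := by omega
    have hcov : pvCov cs num = false :=
      pv_cov_false cs num (fun j hj => Or.inl (hinv j hj (by omega)))
    refine ⟨i, ?_, hi, hinv⟩
    rw [pvInnerA, dif_neg hie, hcov]
    simp [pvTok, String.append_assoc]
  | succ fuel ih =>
    intro i nb hf hi hinv
    by_cases h : i < cs.length
    · rw [pvInnerA, dif_pos h]
      by_cases h1 : (cs[i]).1 > num
      · have hcov : pvCov cs num = false := by
          apply pv_cov_false
          intro j hj
          by_cases hji : j < i
          · exact Or.inl (hinv j hj hji)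
          · right
            rcases Nat.lt_or_ge i j with hij | hij
            · have := List.pairwise_iff_getElem.mp hp i j h hj hij
              omega
            · have : i = j := by omega
              subst this; omega
        refine ⟨i, ?_, hi, hinv⟩
        rw [if_pos h1, hcov]
        simp [pvTok, String.append_assoc]
      · rw [if_neg h1]
        by_cases h2 : (cs[i]).1 ≤ num ∧ (cs[i]).2 ≥ num
        · have hcov : pvCov cs num = true := pv_cov_true cs num i h h2.1 h2.2
          refine ⟨i, ?_, hi, hinv⟩
          rw [if_pos h2, hcov]
          simp
        · rw [if_neg h2]
          have hend : (cs[i]).2 < num := by omega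
          apply ih (i + 1) nb (by omega) (by omega)
          intro j hj hji
          rcases Nat.lt_succ_iff_lt_or_eq.mp hji with h' | h'
          · exact hinv j hj h'
          · subst h'; exact hend
    · have hcov : pvCov cs num = false :=
        pv_cov_false cs num (fun j hj => Or.inl (hinv j hj (by omega)))
      refine ⟨i, ?_, hi, hinv⟩
      rw [pvInnerA, dif_neg h, hcov]
      simp [pvTok, String.append_assoc]

lemma pv_loop_spec (cs : List (Int × Int))
    (hp : List.Pairwise (fun a b : Int × Int => a.1 ≤ b.1) cs) (n : Nat) :
    ∃ i', (PySem.List.pyRange 1 ((n : Int) + 1) 1).foldl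
        (fun st num => pvInnerA cs num st.1 st.2) (0, "") =
      (i', pvRender ((PySem.List.pyRange 1 ((n : Int) + 1) 1).filter (fun x => !pvCov cs x))) ∧
      i' ≤ cs.length ∧ ∀ j (hj : j < cs.length), j < i' → (cs[j]).2 < (n : Int) + 1 := by
  induction n with
  | zero =>
    refine ⟨0, ?_, Nat.zero_le _, fun j hj hj0 => absurd hj0 (by omega)⟩
    rw [PySem.List.pyRange_one_eq_nil (by norm_num)]
    simp [pv_render_nil]
  | succ n ih =>
    obtain ⟨i', hfold, hile, hinv⟩ := ih
    obtain ⟨i'', hstep, hile', hinv'⟩ :=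
      pvInnerA_spec cs hp ((n : Int) + 1) cs.length i' (pvRender
        ((PySem.List.pyRange 1 ((n : Int) + 1) 1).filter (fun x => !pvCov cs x)))
        (by omega) hile hinv
    have hsplit : PySem.List.pyRange 1 (((n + 1 : Nat) : Int) + 1) 1
        = PySem.List.pyRange 1 ((n : Int) + 1) 1 ++ [(n : Int) + 1] := by
      push_cast
      exact PySem.List.pyRange_one_succ_right (by omega)
    refine ⟨i'', ?_, hile', fun j hj hji => by
      have := hinv' j hj hji; push_cast; omega⟩
    rw [hsplit, List.foldl_append, hfold]
    simp only [List.foldl_cons, List.foldl_nil]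
    rw [hstep]
    congr 1
    rw [List.filter_append]
    by_cases hc : pvCov cs ((n : Int) + 1)
    · simp [hc]
    · simp [hc, pv_render_append, pv_render_singleton]

-- digits of str(x) for x ≥ 1: nonempty and free of whitespace
lemma pv_digitChar_not_space (k : Nat) (hk : k < 10) :
    PySem.Chars.isspace (Nat.digitChar k) = false := by
  interval_cases k <;> decide

lemma pv_toDigitsCore_ne_nil :
    ∀ (f n : Nat) (acc : List Char), f ≠ 0 ∨ acc ≠ [] → Nat.toDigitsCore 10 f n acc ≠ [] := by
  intro f
  induction f with
  | zero =>
    intro n acc h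
    simp only [Nat.toDigitsCore]
    tauto
  | succ f ih =>
    intro n acc h
    simp only [Nat.toDigitsCore]
    split
    · simp
    · exact ih _ _ (Or.inr (by simp))

lemma pv_toDigitsCore_nonspace :
    ∀ (f n : Nat) (acc : List Char), (∀ c ∈ acc, PySem.Chars.isspace c = false) →
    ∀ c ∈ Nat.toDigitsCore 10 f n acc, PySem.Chars.isspace c = false := by
  intro f
  induction f with
  | zero =>
    intro n acc hacc
    simp only [Nat.toDigitsCore]
    exact hacc
  | succ f ih =>
    intro n acc hacc
    simp only [Nat.toDigitsCore]
    have hd : PySem.Chars.isspace (Nat.digitChar (n % 10)) = false :=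
      pv_digitChar_not_space _ (Nat.mod_lt _ (by norm_num))
    split
    · intro c hc
      rcases List.mem_cons.mp hc with h | h
      · subst h; exact hd
      · exact hacc c h
    · apply ih
      intro c hc
      rcases List.mem_cons.mp hc with h | h
      · subst h; exact hd
      · exact hacc c h

lemma pv_toChars_ne_nil (x : Int) (hx : 1 ≤ x) : PySem.Int.toChars x ≠ [] := by
  rw [PySem.Int.toChars, if_neg (by omega)]
  exact pv_toDigitsCore_ne_nil _ _ _ (Or.inl (Nat.succ_ne_zero _))

lemma pv_toChars_nonspace (x : Int) (hx : 1 ≤ x) :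
    ∀ c ∈ PySem.Int.toChars x, PySem.Chars.isspace c = false := by
  rw [PySem.Int.toChars, if_neg (by omega)]
  exact pv_toDigitsCore_nonspace _ _ _ (by simp)

lemma pv_go_word :
    ∀ (w : List Char), (∀ c ∈ w, PySem.Chars.isspace c = false) →
    ∀ (cur : List Char) (acc : List (List Char)) (rest : List Char), cur.reverse ++ w ≠ [] →
    PySem.Chars.split₀.go (w ++ ' ' :: rest) cur acc
      = PySem.Chars.split₀.go rest [] ((cur.reverse ++ w) :: acc) := by
  intro w
  induction w with
  | nil =>
    intro _ cur acc rest hne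
    have hcur : cur ≠ [] := by
      intro h; subst h; simp at hne
    rw [List.nil_append]
    rw [PySem.Chars.split₀.go]
    have hsp : PySem.Chars.isspace ' ' = true := by decide
    simp [hsp, List.isEmpty_iff, hcur]
  | cons c w' ih =>
    intro hns cur acc rest hne
    have hc : PySem.Chars.isspace c = false := hns c (List.mem_cons_self)
    rw [List.cons_append, PySem.Chars.split₀.go]
    simp only [hc, Bool.false_eq_true, if_false]
    rw [ih (fun d hd => hns d (List.mem_cons_of_mem _ hd)) (c :: cur) acc rest (by simp)]
    congr 2
    simp

lemma pv_go_render (xs : List Int) (h : ∀ x ∈ xs, 1 ≤ x) :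
    ∀ acc, PySem.Chars.split₀.go (pvRenderL xs) [] acc
      = acc.reverse ++ xs.map PySem.Int.toChars := by
  induction xs with
  | nil =>
    intro acc
    simp [pvRenderL, PySem.Chars.split₀.go]
  | cons x t ih =>
    intro acc
    have hx : 1 ≤ x := h x List.mem_cons_self
    have hren : pvRenderL (x :: t) = PySem.Int.toChars x ++ ' ' :: pvRenderL t := by
      simp [pvRenderL]
    rw [hren, pv_go_word _ (pv_toChars_nonspace x hx) [] acc _
      (by simpa using pv_toChars_ne_nil x hx)]
    simp only [List.reverse_nil, List.nil_append]
    rw [ih (fun y hy => h y (List.mem_cons_of_mem _ hy)) (PySem.Int.toChars x :: acc)]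
    simp

lemma pv_split_render (xs : List Int) (h : ∀ x ∈ xs, 1 ≤ x) :
    (PySem.Str.split₀ (pvRender xs)).length = xs.length := by
  rw [PySem.Str.split₀]
  rw [pv_toList_render]
  rw [PySem.Chars.split₀, pv_go_render xs h []]
  simp

-- ===== VERDICT (by name: the statement is the Claim_ definition above) =====
theorem pointsInSegments_spec : Claim_equal_pointsInSegments := by
  intro coordinates m _
  simp only [Spec_pointsInSegments, pointsInSegments, pointsInSegments_alt]
  have hlam : (fun x => !((PySem.List.sorted coordinates (fun tup => tup.1)).any
      (fun se => decide (se.1 ≤ x) && decide (x ≤ se.2))))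
      = fun x => !pvCov (PySem.List.sorted coordinates (fun tup => tup.1)) x := rfl
  rw [hlam]
  set cs := PySem.List.sorted coordinates (fun tup => tup.1) with hcs
  have hp : List.Pairwise (fun a b : Int × Int => a.1 ≤ b.1) cs :=
    PySem.List.sorted_pairwise coordinates (fun tup : Int × Int => tup.1)
  by_cases hm : m + 1 ≤ 1
  · rw [PySem.List.pyRange_one_eq_nil hm]
    simp
  · have hm0 : 0 ≤ m := by omega
    obtain ⟨i', hfold, -, -⟩ := pv_loop_spec cs hp m.toNat
    rw [show ((m.toNat : Int)) = m from Int.toNat_of_nonneg hm0] at hfold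
    rw [hfold]
    have hge : ∀ x ∈ (PySem.List.pyRange 1 (m + 1) 1).filter (fun x => !pvCov cs x), 1 ≤ x := by
      intro x hx
      have := (PySem.List.mem_pyRange_one).mp (List.mem_of_mem_filter hx)
      omega
    cases hF : (PySem.List.pyRange 1 (m + 1) 1).filter (fun x => !pvCov cs x) with
    | nil => simp [pv_render_nil]
    | cons y ys =>
      rw [hF] at hge
      have hne : pvRender (y :: ys) ≠ "" := by
        intro hemp
        have := congrArg String.toList hemp
        rw [pv_toList_render] at this
        simp [pvRenderL] at this
      have hbeq : (pvRender (y :: ys) == "") = false := beq_eq_false_iff_ne.mpr hne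
      simp only [hbeq, Bool.false_eq_true, if_false, List.isEmpty_cons]
      rw [pv_split_render _ hge]
      rfl
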